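-- pv_equiv track=rewrite | github.com/brengall99/learning | mooc_24/part_4/04_31/all_longest_in_list.py | all_the_longest
-- ===== SOURCE A (Python) =====
-- def all_the_longest(list1: list) -> list:
--     longest = ""
--     list2 = []
--
--     for i in list1:
--         if len(i) > len(longest):
--             longest = i
--         max_num = len(longest)
--
--     for j in list1:
--         if len(j) == max_num:
--             list2.append(j)
--
--     return list2
-- ===== SOURCE B (Python) =====
-- def all_the_longest(list1: list) -> list:
--     buckets = {}
--     for s in list1:
--         buckets.setdefault(len(s), []).append(s)
--     if not buckets:
--         return []
--     return buckets[max(buckets)]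
-- ===== Notes on version B (the rewrite author's own statement) =====
-- stated objective: alternative
-- what changed: Replaces A's two scans (running-max then filter) with a single pass that groups strings into a length-keyed dict, then returns the bucket of the maximum key.
import Mathlib
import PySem

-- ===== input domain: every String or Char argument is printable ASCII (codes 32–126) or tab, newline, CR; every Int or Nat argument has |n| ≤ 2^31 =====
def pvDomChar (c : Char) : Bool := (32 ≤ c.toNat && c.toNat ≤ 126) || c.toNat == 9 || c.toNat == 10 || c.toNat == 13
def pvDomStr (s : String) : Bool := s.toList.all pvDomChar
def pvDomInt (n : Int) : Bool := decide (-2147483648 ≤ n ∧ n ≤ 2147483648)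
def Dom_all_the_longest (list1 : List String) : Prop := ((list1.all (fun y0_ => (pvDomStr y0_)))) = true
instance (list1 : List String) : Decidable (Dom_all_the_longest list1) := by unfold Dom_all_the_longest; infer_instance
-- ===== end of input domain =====

-- B groups strings into a length-keyed dict in one pass and returns the bucket of
-- the maximum key, instead of A's running-max scan followed by a filter scan (objective: alternative).

-- ===== PORT A =====
def all_the_longest (list1 : List String) : List String :=
  let longest : String := list1.foldl (fun longest i =>
    if PySem.Str.len i > PySem.Str.len longest then i else longest) ""
  let max_num : Int := PySem.Str.len longest
  list1.foldl (fun list2 j =>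
    if PySem.Str.len j == max_num then list2 ++ [j] else list2) []

-- ===== PORT B =====
def all_the_longest_alt (list1 : List String) : List String :=
  let buckets : PySem.Dict Int (List String) :=
    list1.foldl (fun d s => d.modify (PySem.Str.len s) [] (fun v => v ++ [s])) PySem.Dict.empty
  match PySem.List.max? buckets.keys (fun x => x) with
  | none => []
  | some m => buckets.getD m []

-- ===== PRECONDITION & SPEC =====
def Spec_all_the_longest (list1 : List String) (out : List String) : Prop := out = all_the_longest_alt list1
instance (list1 : List String) (out : List String) : Decidable (Spec_all_the_longest list1 out) := by unfold Spec_all_the_longest; infer_instance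

-- ===== CLAIM (what is proved, stated in full; the proofs are below) =====
def Claim_equal_all_the_longest : Prop := ∀ (list1 : List String), Dom_all_the_longest list1 → Spec_all_the_longest list1 (all_the_longest list1)

-- ===== LEMMAS AND PROOFS =====

theorem pv_len_nonneg (s : String) : 0 ≤ PySem.Str.len s := by
  simp [PySem.Str.len_eq]

-- length of A's running maximum = running max of the lengths
theorem pv_longest_len (l : List String) (a : String) :
    PySem.Str.len (l.foldl (fun longest i =>
      if PySem.Str.len i > PySem.Str.len longest then i else longest) a)
    = l.foldl (fun m s => max m (PySem.Str.len s)) (PySem.Str.len a) := by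
  induction l generalizing a with
  | nil => rfl
  | cons x t ih =>
    simp only [List.foldl_cons]
    by_cases h : PySem.Str.len x > PySem.Str.len a
    · rw [if_pos h, ih]
      congr 1
      omega
    · rw [if_neg h, ih]
      congr 1
      omega

-- B's grouping loop: each bucket is the filter of its length class
theorem pv_buckets_getD (l : List String) (d : PySem.Dict Int (List String)) (c : Int) :
    (l.foldl (fun d s => d.modify (PySem.Str.len s) [] (fun v => v ++ [s])) d).getD c []
    = d.getD c [] ++ l.filter (fun s => PySem.Str.len s == c) := by
  induction l generalizing d with
  | nil => simp
  | cons x t ih =>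
    simp only [List.foldl_cons, List.filter_cons]
    rw [ih]
    by_cases h : PySem.Str.len x = c
    · subst h
      rw [PySem.Dict.getD_modify_self]
      simp
    · have hne : ¬ (c = PySem.Str.len x) := fun hc => h hc.symm
      rw [PySem.Dict.getD_modify, if_neg hne]
      simp at h
      simp [h]
  
-- B's keys are exactly the lengths occurring in the list
theorem pv_mem_keys (l : List String) (c : Int) :
    c ∈ (l.foldl (fun d s => d.modify (PySem.Str.len s) [] (fun v => v ++ [s]))
          (PySem.Dict.empty : PySem.Dict Int (List String))).keys
    ↔ c ∈ l.map PySem.Str.len := by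
  rw [PySem.Dict.keys_foldl_modify_key]
  simp [PySem.Set.mem_update, PySem.Dict.keys_empty]

-- the running max over a nonempty list of nonnegative values is attained
theorem pv_max_attained (l : List String) (h : l ≠ []) :
    l.foldl (fun m s => max m (PySem.Str.len s)) 0 ∈ l.map PySem.Str.len := by
  have hmap : l.foldl (fun m s => max m (PySem.Str.len s)) 0
      = (l.map PySem.Str.len).foldl max 0 := by
    rw [List.foldl_map]
  rw [hmap]
  rcases PySem.List.foldl_max_mem (l.map PySem.Str.len) 0 with h0 | hm
  · -- result is the initial 0: then the first length is 0 and is in the list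
    cases l with
    | nil => exact absurd rfl h
    | cons x t =>
      have hle := (PySem.List.le_foldl_max ((x :: t).map PySem.Str.len) 0).2
        (PySem.Str.len x) (by simp)
      have hx : PySem.Str.len x = 0 := by
        have := pv_len_nonneg x; omega
      rw [h0, ← hx]
      simp
  · exact hm

theorem all_the_longest_eq_filter (list1 : List String) :
    all_the_longest list1
    = list1.filter (fun j => PySem.Str.len j ==
        list1.foldl (fun m s => max m (PySem.Str.len s)) 0) := by
  unfold all_the_longest
  rw [PySem.List.foldl_append_if_eq_filter]
  rw [pv_longest_len]
  simp [PySem.Str.len_eq]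

-- ===== VERDICT (by name: the statement is the Claim_ definition above) =====
theorem all_the_longest_spec : Claim_equal_all_the_longest := by
  intro list1 _
  unfold Spec_all_the_longest
  rw [all_the_longest_eq_filter]
  unfold all_the_longest_alt
  simp only []
  set buckets := list1.foldl (fun d s => d.modify (PySem.Str.len s) [] (fun v => v ++ [s]))
    (PySem.Dict.empty : PySem.Dict Int (List String)) with hb
  cases hmx : PySem.List.max? buckets.keys (fun x => x) with
  | none =>
    -- keys empty ⇒ list1 = [] ⇒ both sides []
    have hk : buckets.keys = [] := by
      exact (PySem.List.max?_eq_none_iff _ _).mp hmx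
    cases list1 with
    | nil => simp
    | cons x t =>
      exfalso
      have : PySem.Str.len x ∈ buckets.keys := by
        rw [hb, pv_mem_keys]; simp
      rw [hk] at this; simp at this
  | some m =>
    have hne : list1 ≠ [] := by
      intro h
      subst h
      have : buckets.keys = [] := by rw [hb]; rfl
      rw [this] at hmx
      simp [PySem.List.max?] at hmx
    -- m is the max of the lengths
    set M := list1.foldl (fun m s => max m (PySem.Str.len s)) 0 with hM
    have hmem : m ∈ buckets.keys := PySem.List.max?_mem hmx
    have hmlen : m ∈ list1.map PySem.Str.len := by rw [hb, pv_mem_keys] at hmem; exact hmem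
    have hmle : m ≤ M := by
      rcases List.mem_map.mp hmlen with ⟨s, hs, hss⟩
      have := (PySem.List.le_foldl_max_int list1 PySem.Str.len 0).2 s hs
      omega
    have hMk : M ∈ buckets.keys := by
      rw [hb, pv_mem_keys]; exact pv_max_attained list1 hne
    have hMle : M ≤ m := by
      have := PySem.List.max?_isMax hmx M hMk
      simpa using this
    have hmM : m = M := le_antisymm hmle hMle
    show List.filter (fun j => PySem.Str.len j == M) list1 = buckets.getD m []
    rw [hb, pv_buckets_getD, hmM]
    simp [PySem.Dict.getD_empty]
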